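-- pv_equiv track=rewrite | github.com/human-technology-institute/structure_learning | src/structure_learning/proposals/partition/partition_proposal.py | _possible_permutations
-- ===== SOURCE A (Python) =====
-- def _possible_permutations(n, party):
--     m = len(party)
--     possibs = [0] * (m)
--     if m > 1:
--         remainder = n
--         for i in range(m):
--             remainder = remainder - party[i]
--             possibs[i] = party[i]*remainder
--     return possibs
-- ===== SOURCE B (Python) =====
-- def _possible_permutations(n, party):
--     m = len(party)
--     if m <= 1:
--         return [0] * m
--     base = n - sum(party)          # remainder after the whole list is consumed
--     out = []
--     suffix = 0                     # sum of the elements strictly after position i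
--     for p in reversed(party):
--         out.append(p * (base + suffix))
--         suffix += p
--     out.reverse()
--     return out
-- ===== Notes on version B (the rewrite author's own statement) =====
-- stated objective: alternative
-- what changed: Instead of A's left-to-right pass that subtracts party[i] from a shrinking remainder, B computes total = sum(party) once, then walks the list RIGHT-TO-LEFT maintaining a growing suffix sum, emitting p*(n - total + suffix) and reversing the built list at the end.
import Mathlib
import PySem

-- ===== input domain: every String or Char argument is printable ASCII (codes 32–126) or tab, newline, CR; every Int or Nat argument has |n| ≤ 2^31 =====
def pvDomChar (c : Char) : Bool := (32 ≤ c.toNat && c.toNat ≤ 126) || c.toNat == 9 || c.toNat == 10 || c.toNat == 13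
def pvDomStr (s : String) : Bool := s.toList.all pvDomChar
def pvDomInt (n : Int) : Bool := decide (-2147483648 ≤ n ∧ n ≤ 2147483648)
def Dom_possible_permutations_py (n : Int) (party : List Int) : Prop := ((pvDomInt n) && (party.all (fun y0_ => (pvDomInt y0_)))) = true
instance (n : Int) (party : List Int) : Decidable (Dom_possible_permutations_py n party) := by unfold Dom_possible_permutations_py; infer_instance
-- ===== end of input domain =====

-- B replaces A's left-to-right shrinking-remainder loop by a right-to-left pass over the list with a suffix-sum accumulator (total computed once, output reversed at the end); objective: alternative.


-- ===== PORT A =====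
-- loop body: remainder = remainder - party[i]; possibs[i] = party[i]*remainder
-- (i ranges over 0..m-1, so party[i] never raises; pyGetD with default 0 is exact here)
def pvStepA (party : List Int) (st : List Int × Int) (i : Int) : List Int × Int :=
  let r := st.2 - PySem.List.pyGetD party i 0
  (st.1.set i.toNat (PySem.List.pyGetD party i 0 * r), r)

def possible_permutations_py (n : Int) (party : List Int) : List Int :=
  let m := party.length
  let possibs := List.replicate m (0 : Int)
  if 1 < m then
    ((PySem.List.pyRange 0 (m : Int) 1).foldl (pvStepA party) (possibs, n)).1
  else possibs

-- ===== PORT B =====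
-- for p in reversed(party): out.append(p*(base+suffix)); suffix += p; finally out.reverse()
def pvStepB (base : Int) (st : List Int × Int) (p : Int) : List Int × Int :=
  (st.1 ++ [p * (base + st.2)], st.2 + p)

def possible_permutations_py_alt (n : Int) (party : List Int) : List Int :=
  let m := party.length
  if m ≤ 1 then List.replicate m (0 : Int)
  else
    (party.reverse.foldl (pvStepB (n - party.sum)) ([], 0)).1.reverse

-- ===== PRECONDITION & SPEC =====
def Spec_possible_permutations_py (n : Int) (party : List Int) (out : List Int) : Prop := out = possible_permutations_py_alt n party
instance (n : Int) (party : List Int) (out : List Int) : Decidable (Spec_possible_permutations_py n party out) := by unfold Spec_possible_permutations_py; infer_instance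

-- ===== CLAIM (what is proved, stated in full; the proofs are below) =====
def Claim_equal_possible_permutations_py : Prop := ∀ (n : Int) (party : List Int), Dom_possible_permutations_py n party → Spec_possible_permutations_py n party (possible_permutations_py n party)

-- ===== LEMMAS AND PROOFS =====

-- common reference value: pvG n [p0,p1,...] = [p0*(n-p0), p1*(n-p0-p1), ...]
def pvG (n : Int) : List Int → List Int
  | [] => []
  | p :: ps => p * (n - p) :: pvG (n - p) ps

theorem pvG_length (n : Int) (ps : List Int) : (pvG n ps).length = ps.length := by
  induction ps generalizing n with
  | nil => rfl
  | cons p ps ih => simp [pvG, ih]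

theorem sum_take_succ_int (l : List Int) (k : Nat) (h : k < l.length) :
    (l.take (k + 1)).sum = (l.take k).sum + l[k] := by
  induction l generalizing k with
  | nil => simp at h
  | cons a l ih =>
    cases k with
    | zero => simp
    | succ k =>
      simp only [List.take_succ_cons, List.sum_cons, List.getElem_cons_succ]
      rw [ih k (by simpa using h)]
      ring

theorem pvG_getElem (ps : List Int) (n : Int) (k : Nat) (hk : k < ps.length) :
    (pvG n ps)[k]'(by simpa [pvG_length] using hk) = ps[k] * (n - ((ps.take (k + 1)).sum)) := by
  induction ps generalizing n k with
  | nil => simp at hk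
  | cons p ps ih =>
    cases k with
    | zero => simp [pvG]
    | succ k =>
      have hk' : k < ps.length := by simpa using hk
      simp only [pvG, List.getElem_cons_succ, List.take_succ_cons, List.sum_cons]
      rw [ih (n - p) k hk']
      ring

-- B-side reference: the list built in iteration order (reversed party, suffix sums)
def pvBList (base s : Int) : List Int → List Int
  | [] => []
  | q :: qs => q * (base + s) :: pvBList base (s + q) qs

theorem pvB_foldl (base : Int) (qs : List Int) (acc : List Int) (s : Int) :
    qs.foldl (pvStepB base) (acc, s) = (acc ++ pvBList base s qs, s + qs.sum) := by
  induction qs generalizing acc s with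
  | nil => simp [pvBList]
  | cons q qs ih => simp [pvStepB, pvBList, ih]; ring

theorem pvBList_append (base s : Int) (xs ys : List Int) :
    pvBList base s (xs ++ ys) = pvBList base s xs ++ pvBList base (s + xs.sum) ys := by
  induction xs generalizing s with
  | nil => simp [pvBList]
  | cons x xs ih =>
    simp only [List.cons_append, pvBList, List.sum_cons, ih]
    have : s + (x + xs.sum) = s + x + xs.sum := by ring
    rw [this]

theorem pvB_reverse_eq_pvG (base s : Int) (ps : List Int) :
    (pvBList base s ps.reverse).reverse = pvG (base + s + ps.sum) ps := by
  induction ps generalizing s with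
  | nil => simp [pvBList, pvG]
  | cons p ps ih =>
    rw [List.reverse_cons, pvBList_append]
    simp only [pvBList, List.reverse_append, List.reverse_cons, List.reverse_nil,
      List.nil_append, List.cons_append, pvG, ih, List.sum_reverse, List.sum_cons]
    have h : base + s + (p + ps.sum) - p = base + s + ps.sum := by ring
    rw [h]
    congr 1
    ring

-- A-side: invariant of the fold over range(m)
theorem pvA_fold (party : List Int) (n : Int) (k : Nat) (hk : k ≤ party.length) :
    (PySem.List.pyRange 0 (k : Int) 1).foldl (pvStepA party) (List.replicate party.length 0, n)
      = ((pvG n party).take k ++ List.replicate (party.length - k) 0, n - (party.take k).sum) := by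
  induction k with
  | zero => simp [PySem.List.pyRange_one_eq_nil]
  | succ k ih =>
    have hk' : k < party.length := hk
    have hget : PySem.List.pyGetD party (k : Int) 0 = party[k] := by
      rw [PySem.List.pyGetD_eq_getElem party 0 (by positivity) (by exact_mod_cast hk')]
      simp
    rw [show (((k + 1 : Nat)) : Int) = ((k : Nat) : Int) + 1 by push_cast; ring,
      PySem.List.pyRange_one_succ_right (by positivity), List.foldl_append, ih (le_of_lt hk')]
    simp only [List.foldl_cons, List.foldl_nil, pvStepA, hget]
    have hlen : ((pvG n party).take k).length = k := by
      simp [pvG_length]; omega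
    have hset : (((pvG n party).take k ++ List.replicate (party.length - k) 0).set
          ((k : Int)).toNat (party[k] * (n - (party.take k).sum - party[k])))
        = (pvG n party).take (k + 1) ++ List.replicate (party.length - (k + 1)) 0 := by
      have hrep : party.length - k = (party.length - (k + 1)) + 1 := by omega
      rw [Int.toNat_natCast, List.set_append, if_neg (by omega), hlen]
      rw [hrep, List.replicate_succ]
      simp only [Nat.sub_self, List.set_cons_zero]
      rw [List.take_add_one, List.getElem?_eq_getElem (by simpa [pvG_length] using hk'),
        pvG_getElem party n k hk', sum_take_succ_int party k hk']
      simp only [Option.toList_some, List.append_assoc, List.singleton_append]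
      ring_nf
    rw [hset, sum_take_succ_int party k hk', sub_sub]

-- ===== VERDICT (by name: the statement is the Claim_ definition above) =====
theorem possible_permutations_py_spec : Claim_equal_possible_permutations_py := by
  intro n party _
  unfold Spec_possible_permutations_py possible_permutations_py possible_permutations_py_alt
  by_cases h : 1 < party.length
  · rw [if_pos h, if_neg (by omega)]
    rw [pvA_fold party n party.length le_rfl]
    rw [pvB_foldl, List.nil_append, pvB_reverse_eq_pvG]
    simp [List.take_of_length_le (le_of_eq (pvG_length n party))]
  · rw [if_neg h, if_pos (by omega)]
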